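-- pv_equiv track=rewrite | github.com/Alpaca-Network/gatewayz-backend | src/routes/monitoring.py | _is_valid_sentry_host
-- ===== SOURCE A (Python) =====
-- ALLOWED_SENTRY_HOSTS = {
--     "sentry.io",
--     "o4510344966111232.ingest.us.sentry.io",  # From the error URL
--     "ingest.sentry.io",
--     "ingest.us.sentry.io",
-- }
--
-- def _is_valid_sentry_host(hostname: str | None) -> bool:
--     """
--     Validate that a hostname is a legitimate Sentry host.
--
--     Uses exact matching or proper subdomain checking to prevent SSRF attacks
--     via malicious domains like evil-sentry.io or malicioussentry.io.
--
--     Args: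
--         hostname: The hostname to validate
--
--     Returns:
--         True if hostname is a valid Sentry host, False otherwise
--     """
--     if not hostname:
--         return False
--
--     for allowed in ALLOWED_SENTRY_HOSTS:
--         # Exact match
--         if hostname == allowed:
--             return True
--         # Valid subdomain (must have dot before the allowed domain)
--         if hostname.endswith("." + allowed):
--             return True
--
--     return False
-- ===== SOURCE B (Python) =====
-- ALLOWED_SENTRY_HOSTS = {
--     "sentry.io",
--     "o4510344966111232.ingest.us.sentry.io",  # From the error URL
--     "ingest.sentry.io",
--     "ingest.us.sentry.io",
-- }
--
-- def _is_valid_sentry_host(hostname: str | None) -> bool: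
--     if not hostname:
--         return False
--     # Dot-delimited suffixes of the hostname: the full string, plus the part
--     # after every '.'; a hostname is valid iff one of them is an allowed host.
--     suffixes = [hostname]
--     for i, ch in enumerate(hostname):
--         if ch == '.':
--             suffixes.append(hostname[i + 1:])
--     return any(s in ALLOWED_SENTRY_HOSTS for s in suffixes)
-- ===== Notes on version B (the rewrite author's own statement) =====
-- stated objective: alternative
-- what changed: Instead of looping over the allowed hosts testing equality and .endswith, B collects the hostname's dot-delimited suffixes in one pass over the hostname and returns whether any of them is in the allowed set (O(1) membership).
import Mathlib
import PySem

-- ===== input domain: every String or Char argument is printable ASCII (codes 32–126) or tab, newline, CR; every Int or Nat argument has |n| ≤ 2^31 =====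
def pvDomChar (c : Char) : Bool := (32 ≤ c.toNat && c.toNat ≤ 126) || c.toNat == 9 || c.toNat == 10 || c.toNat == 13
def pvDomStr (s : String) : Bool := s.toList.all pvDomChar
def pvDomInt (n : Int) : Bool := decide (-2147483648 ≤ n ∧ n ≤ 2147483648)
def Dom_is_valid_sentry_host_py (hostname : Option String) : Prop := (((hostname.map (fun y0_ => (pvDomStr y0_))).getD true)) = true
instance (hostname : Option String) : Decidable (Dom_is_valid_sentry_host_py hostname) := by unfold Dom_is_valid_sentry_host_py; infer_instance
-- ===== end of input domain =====

-- B collects the hostname's dot-delimited suffixes in one pass and tests set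
-- membership, instead of A's loop over the allowed hosts with equality/.endswith.

-- ===== PORT A =====
def pvAllowed : List String :=
  ["sentry.io", "o4510344966111232.ingest.us.sentry.io", "ingest.sentry.io", "ingest.us.sentry.io"]

def is_valid_sentry_host_py (hostname : Option String) : Bool :=
  match hostname with
  | none => false
  | some s =>
    if s = "" then false     -- 'if not hostname'
    else
      -- 'for allowed in ALLOWED_SENTRY_HOSTS: …' with early 'return True'
      pvAllowed.any (fun allowed => s == allowed || PySem.Str.endswith s ("." ++ allowed))

-- ===== PORT B =====
-- the loop 'for i, ch in enumerate(hostname): if ch == '.': suffixes.append(hostname[i+1:])'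
-- collects, in order, exactly the tail after each '.' — this recursion produces the same list
def pvDotSuffixes : List Char → List (List Char)
  | [] => []
  | c :: rest => if c = '.' then rest :: pvDotSuffixes rest else pvDotSuffixes rest

def is_valid_sentry_host_py_alt (hostname : Option String) : Bool :=
  match hostname with
  | none => false
  | some s =>
    if s = "" then false     -- 'if not hostname'
    else
      -- 'any(s in ALLOWED_SENTRY_HOSTS for s in suffixes)'
      (s.toList :: pvDotSuffixes s.toList).any
        (fun suf => (pvAllowed.map String.toList).contains suf)

-- ===== PRECONDITION & SPEC =====
def Spec_is_valid_sentry_host_py (hostname : Option String) (out : Bool) : Prop := out = is_valid_sentry_host_py_alt hostname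
instance (hostname : Option String) (out : Bool) : Decidable (Spec_is_valid_sentry_host_py hostname out) := by unfold Spec_is_valid_sentry_host_py; infer_instance

-- ===== CLAIM (what is proved, stated in full; the proofs are below) =====
def Claim_equal_is_valid_sentry_host_py : Prop := ∀ (hostname : Option String), Dom_is_valid_sentry_host_py hostname → Spec_is_valid_sentry_host_py hostname (is_valid_sentry_host_py hostname)

-- ===== LEMMAS AND PROOFS =====

-- a list is a dot-suffix of cs iff '.' followed by it is a suffix of cs
lemma mem_pvDotSuffixes (as cs : List Char) :
    as ∈ pvDotSuffixes cs ↔ ('.' :: as) <:+ cs := by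
  induction cs with
  | nil => simp [pvDotSuffixes]
  | cons c rest ih =>
    rw [List.suffix_cons_iff]
    by_cases hc : c = '.'
    · subst hc
      simp [pvDotSuffixes, ih]
    · simp [pvDotSuffixes, hc, ih, Ne.symm hc]

lemma any_eq_any (s : String) :
    pvAllowed.any (fun allowed => s == allowed || PySem.Str.endswith s ("." ++ allowed)) =
    (s.toList :: pvDotSuffixes s.toList).any
      (fun suf => (pvAllowed.map String.toList).contains suf) := by
  rw [Bool.eq_iff_iff]
  simp only [List.any_eq_true, List.contains_eq_mem, List.mem_map, List.mem_cons,
    Bool.or_eq_true, beq_iff_eq, PySem.Str.endswith_eq, PySem.Chars.endswith_iff,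
    String.toList_append, decide_eq_true_eq]
  constructor
  · rintro ⟨a, ha, h | h⟩
    · exact ⟨s.toList, Or.inl rfl, a, ha, by rw [h]⟩
    · refine ⟨a.toList, Or.inr ?_, a, ha, rfl⟩
      rw [mem_pvDotSuffixes]
      simpa using h
  · rintro ⟨suf, hsuf, a, ha, rfl⟩
    rcases hsuf with h | h
    · exact ⟨a, ha, Or.inl (String.toList_inj.mp h.symm)⟩
    · refine ⟨a, ha, Or.inr ?_⟩
      rw [mem_pvDotSuffixes] at h
      simpa using h

-- ===== VERDICT (by name: the statement is the Claim_ definition above) =====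
theorem is_valid_sentry_host_py_spec : Claim_equal_is_valid_sentry_host_py := by
  intro hostname _
  unfold Spec_is_valid_sentry_host_py is_valid_sentry_host_py is_valid_sentry_host_py_alt
  cases hostname with
  | none => rfl
  | some s =>
    by_cases hs : s = ""
    · simp [hs]
    · simp only [hs, if_false]
      exact any_eq_any s
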